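-- pv_equiv track=rewrite | github.com/kmfahey/risuspubl | load_data.py | generate_year_month_span
-- ===== SOURCE A (Python) =====
-- def generate_year_month_span(startyear, startmonth, endyear, endmonth):
--     year_month_pairs = list()
--     for this_year in range(startyear, endyear+1):
--         this_startmonth = startmonth if this_year == startyear else 1
--         this_endmonth = endmonth if this_year == endyear else 12
--         for this_month in range(this_startmonth, this_endmonth+1):
--             year_month_pairs.append((this_year, this_month))
--     return year_month_pairs
-- ===== SOURCE B (Python) =====
-- def generate_year_month_span(startyear, startmonth, endyear, endmonth):
--     # three-segment construction: first partial year, full middle years, last partial year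
--     if startyear > endyear:
--         return []
--     if startyear == endyear:
--         return [(startyear, m) for m in range(startmonth, endmonth + 1)]
--     first = [(startyear, m) for m in range(startmonth, 13)]
--     middle = [(y, m) for y in range(startyear + 1, endyear) for m in range(1, 13)]
--     last = [(endyear, m) for m in range(1, endmonth + 1)]
--     return first + middle + last
-- ===== Notes on version B (the rewrite author's own statement) =====
-- stated objective: alternative
-- what changed: Replaced the uniform year loop with per-iteration clamping conditionals by a three-segment construction (first partial year ++ full middle years ++ last partial year), with degenerate single-year/empty spans handled by early returns.
import Mathlib
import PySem

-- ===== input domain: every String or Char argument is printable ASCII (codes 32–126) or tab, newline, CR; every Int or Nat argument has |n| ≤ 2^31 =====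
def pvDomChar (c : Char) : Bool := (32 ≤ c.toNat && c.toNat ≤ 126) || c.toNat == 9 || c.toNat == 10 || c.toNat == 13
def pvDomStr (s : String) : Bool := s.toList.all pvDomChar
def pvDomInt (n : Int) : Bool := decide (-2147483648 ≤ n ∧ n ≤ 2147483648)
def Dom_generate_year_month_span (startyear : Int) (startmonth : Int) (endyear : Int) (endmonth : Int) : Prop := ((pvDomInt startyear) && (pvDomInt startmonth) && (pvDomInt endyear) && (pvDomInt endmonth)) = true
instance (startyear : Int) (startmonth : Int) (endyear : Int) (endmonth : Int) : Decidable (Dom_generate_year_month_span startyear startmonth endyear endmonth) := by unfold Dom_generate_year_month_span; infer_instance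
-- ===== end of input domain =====

-- B replaces the clamping year loop by a three-segment list construction (alternative decomposition, same cost).
-- ===== PORT A =====
def generate_year_month_span (startyear : Int) (startmonth : Int) (endyear : Int) (endmonth : Int) : List (Int × Int) :=
  (PySem.List.pyRange startyear (endyear + 1) 1).foldl
    (fun acc this_year =>
      let this_startmonth := if this_year = startyear then startmonth else 1
      let this_endmonth := if this_year = endyear then endmonth else 12
      (PySem.List.pyRange this_startmonth (this_endmonth + 1) 1).foldl
        (fun acc2 this_month => acc2 ++ [(this_year, this_month)]) acc)
    []

-- ===== PORT B =====
def generate_year_month_span_alt (startyear : Int) (startmonth : Int) (endyear : Int) (endmonth : Int) : List (Int × Int) :=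
  if startyear > endyear then []
  else if startyear = endyear then
    (PySem.List.pyRange startmonth (endmonth + 1) 1).map (fun m => (startyear, m))
  else
    ((PySem.List.pyRange startmonth 13 1).map (fun m => (startyear, m))
      ++ (PySem.List.pyRange (startyear + 1) endyear 1).flatMap
           (fun y => (PySem.List.pyRange 1 13 1).map (fun m => (y, m))))
      ++ (PySem.List.pyRange 1 (endmonth + 1) 1).map (fun m => (endyear, m))

-- ===== PRECONDITION & SPEC =====
def Spec_generate_year_month_span (startyear : Int) (startmonth : Int) (endyear : Int) (endmonth : Int) (out : List (Int × Int)) : Prop := out = generate_year_month_span_alt startyear startmonth endyear endmonth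
instance (startyear : Int) (startmonth : Int) (endyear : Int) (endmonth : Int) (out : List (Int × Int)) : Decidable (Spec_generate_year_month_span startyear startmonth endyear endmonth out) := by unfold Spec_generate_year_month_span; infer_instance

-- ===== CLAIM (what is proved, stated in full; the proofs are below) =====
def Claim_equal_generate_year_month_span : Prop := ∀ (startyear : Int) (startmonth : Int) (endyear : Int) (endmonth : Int), Dom_generate_year_month_span startyear startmonth endyear endmonth → Spec_generate_year_month_span startyear startmonth endyear endmonth (generate_year_month_span startyear startmonth endyear endmonth)

-- ===== LEMMAS AND PROOFS =====

-- ===== VERDICT (by name: the statement is the Claim_ definition above) =====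
-- A's result as a flatMap over the year range
lemma gyms_eq_flatMap (startyear startmonth endyear endmonth : Int) :
    generate_year_month_span startyear startmonth endyear endmonth
      = (PySem.List.pyRange startyear (endyear + 1) 1).flatMap
          (fun y => (PySem.List.pyRange (if y = startyear then startmonth else 1)
                      ((if y = endyear then endmonth else 12) + 1) 1).map (fun m => (y, m))) := by
  unfold generate_year_month_span
  simp only [PySem.List.foldl_append_singleton_eq_map]
  rw [PySem.List.foldl_append_eq_flatMap]
  simp

theorem generate_year_month_span_spec : Claim_equal_generate_year_month_span := by
  intro sy sm ey em _
  unfold Spec_generate_year_month_span generate_year_month_span_alt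
  rw [gyms_eq_flatMap]
  rcases lt_trichotomy sy ey with h | h | h
  · -- sy < ey : three segments
    rw [if_neg (by omega), if_neg (by omega)]
    rw [PySem.List.pyRange_one_append sy (sy + 1) (ey + 1) (by omega) (by omega),
        PySem.List.pyRange_one_append (sy + 1) ey (ey + 1) (by omega) (by omega),
        PySem.List.pyRange_one_singleton]
    have hlast : PySem.List.pyRange ey (ey + 1) 1 = [ey] := PySem.List.pyRange_one_singleton ey
    rw [hlast]
    simp only [List.flatMap_append, List.flatMap_cons, List.flatMap_nil, List.append_nil]
    simp only [if_true, if_neg (show ¬ sy = ey by omega), if_neg (show ¬ ey = sy by omega)]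
    have hmid : (PySem.List.pyRange (sy + 1) ey 1).flatMap
        (fun y => (PySem.List.pyRange (if y = sy then sm else 1)
                    ((if y = ey then em else 12) + 1) 1).map (fun m => (y, m)))
        = (PySem.List.pyRange (sy + 1) ey 1).flatMap
            (fun y => (PySem.List.pyRange 1 13 1).map (fun m => (y, m))) := by
      apply List.flatMap_congr
      intro y hy
      rw [PySem.List.mem_pyRange_one] at hy
      rw [if_neg (by omega), if_neg (by omega)]
      norm_num
    rw [hmid]
    simp [List.append_assoc]
  · -- sy = ey : single year
    subst h
    rw [if_neg (by omega), if_pos rfl, PySem.List.pyRange_one_singleton]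
    simp
  · -- ey < sy : empty span
    rw [if_pos (by omega), PySem.List.pyRange_one_eq_nil (by omega)]
    simp
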